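-- pv_equiv track=rewrite | github.com/searene/word-fellow | word_fellow/domain/utils/StringUtils.py | split_with_positions
-- ===== SOURCE A (Python) =====
-- def split_with_positions(delimiters: [str], text: str) -> [(str, int)]:
--     """Split text according to delimiters, returns each word and its start position after splitting.
--     Empty strings are excluded
--
--     Parameters:
--         delimiters: A list of strings, the length of each one shuold only be one
--         text: The text to split
--
--     Returns:
--         A list of tuples, each tuple contains:
--             1. A word
--             2. The starting position of the word
--
--     >>> split_with_positions(["a", "b", "c"], "XXXaYYYbZZZcDDD")
--     [('XXX', 0), ('YYY', 4), ('ZZZ', 8), ('DDD', 12)]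
--     >>> split_with_positions(["a", "b", "c"], "XXXaYYYbc")
--     [('XXX', 0), ('YYY', 4)]
--     """
--
--     delimiter_set = set(delimiters)
--     previous_word = ""
--     res = []
--     for i in range(len(text)):
--         c = text[i]
--         if c in delimiter_set:
--
--             # Skip empty words
--             if previous_word == "":
--                 continue
--
--             start_pos_of_previous_word = i - len(previous_word)
--             res.append((previous_word, start_pos_of_previous_word))
--             previous_word = ""
--         else:
--             previous_word += c
--
--     if previous_word != "":
--         res.append((previous_word, len(text) - len(previous_word)))
--     return res
-- ===== SOURCE B (Python) =====
-- def split_with_positions(delimiters, text):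
--     """Two-pointer run scan: jump from word start to word end and slice."""
--     delimiter_set = set(delimiters)
--     res = []
--     i, n = 0, len(text)
--     while i < n:
--         if text[i] in delimiter_set:
--             i += 1
--         else:
--             j = i + 1
--             while j < n and text[j] not in delimiter_set:
--                 j += 1
--             res.append((text[i:j], i))
--             i = j
--     return res
-- ===== Notes on version B (the rewrite author's own statement) =====
-- stated objective: alternative
-- what changed: Replaces the char-by-char accumulator state machine (building previous_word one character at a time and flushing on delimiters) with a two-pointer scan that jumps over each maximal non-delimiter run and slices it out in one step.
import Mathlib
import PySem

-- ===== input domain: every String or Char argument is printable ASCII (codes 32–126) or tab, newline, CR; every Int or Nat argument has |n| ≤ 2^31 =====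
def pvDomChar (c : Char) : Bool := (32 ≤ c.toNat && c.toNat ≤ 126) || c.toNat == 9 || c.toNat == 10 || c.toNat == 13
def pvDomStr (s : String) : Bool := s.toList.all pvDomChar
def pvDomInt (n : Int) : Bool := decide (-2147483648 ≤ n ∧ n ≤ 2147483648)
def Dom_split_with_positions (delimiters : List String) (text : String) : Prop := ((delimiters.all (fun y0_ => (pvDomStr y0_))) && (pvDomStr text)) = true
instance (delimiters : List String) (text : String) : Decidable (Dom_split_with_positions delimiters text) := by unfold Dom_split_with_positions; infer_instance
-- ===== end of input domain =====

-- B replaces A's char-by-char accumulator state machine with a two-pointer scan over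
-- maximal non-delimiter runs (objective: alternative, same O(n) cost).

-- ===== PORT A =====
-- A's loop 'for i in range(len(text)): c = text[i]; …' with state (previous_word, res),
-- as structural recursion over the characters carrying the current index i;
-- previous_word is kept as a List Char (previous_word += c  ↦  prev ++ [c]).
def pvAGo (D : Char → Bool) (cs : List Char) (i : Nat) (prev : List Char)
    (res : List (String × Int)) : List (String × Int) :=
  match cs with
  | [] =>
      -- after the loop: if previous_word != "": res.append((previous_word, len(text) - len(previous_word)))
      if prev ≠ [] then res ++ [(String.mk prev, (i : Int) - prev.length)] else res
  | c :: rest =>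
      if D c then
        if prev = [] then pvAGo D rest (i + 1) [] res
        else pvAGo D rest (i + 1) [] (res ++ [(String.mk prev, (i : Int) - prev.length)])
      else pvAGo D rest (i + 1) (prev ++ [c]) res

def split_with_positions (delimiters : List String) (text : String) : List (String × Int) :=
  let delimiter_set : PySem.Set String := PySem.Set.ofList delimiters
  pvAGo (fun c => PySem.Set.contains delimiter_set (String.mk [c])) text.toList 0 [] []

-- ===== PORT B =====
-- B's outer while loop: skip a delimiter, or slice out the maximal non-delimiter run
-- starting at i (the inner 'while j < n and text[j] not in delimiter_set' is the
-- takeWhile/dropWhile of the run) and jump to its end.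
def pvBGo (D : Char → Bool) (cs : List Char) (i : Nat) : List (String × Int) :=
  match cs with
  | [] => []
  | c :: rest =>
      if D c then pvBGo D rest (i + 1)
      else
        let w := c :: rest.takeWhile (fun x => !D x)
        (String.mk w, (i : Int)) :: pvBGo D (rest.dropWhile (fun x => !D x)) (i + w.length)
termination_by cs.length
decreasing_by
  · simp
  · have := List.length_dropWhile_le (p := fun x => !D x) (l := rest)
    simp; omega

def split_with_positions_alt (delimiters : List String) (text : String) : List (String × Int) :=
  let delimiter_set : PySem.Set String := PySem.Set.ofList delimiters
  pvBGo (fun c => PySem.Set.contains delimiter_set (String.mk [c])) text.toList 0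

-- ===== PRECONDITION & SPEC =====
def Spec_split_with_positions (delimiters : List String) (text : String) (out : List (String × Int)) : Prop := out = split_with_positions_alt delimiters text
instance (delimiters : List String) (text : String) (out : List (String × Int)) : Decidable (Spec_split_with_positions delimiters text out) := by unfold Spec_split_with_positions; infer_instance

-- ===== CLAIM (what is proved, stated in full; the proofs are below) =====
def Claim_equal_split_with_positions : Prop := ∀ (delimiters : List String) (text : String), Dom_split_with_positions delimiters text → Spec_split_with_positions delimiters text (split_with_positions delimiters text)

-- ===== LEMMAS AND PROOFS =====

lemma pvTakeWhile_append_of_all {α : Type} (P : α → Bool) (l l' : List α)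
    (h : ∀ x ∈ l, P x = true) : (l ++ l').takeWhile P = l ++ l'.takeWhile P := by
  induction l with
  | nil => simp
  | cons a as ih =>
      have ha := h a (by simp)
      simp only [List.cons_append, List.takeWhile_cons, ha]
      simp [ih (fun x hx => h x (by simp [hx]))]

lemma pvDropWhile_append_of_all {α : Type} (P : α → Bool) (l l' : List α)
    (h : ∀ x ∈ l, P x = true) : (l ++ l').dropWhile P = l'.dropWhile P := by
  induction l with
  | nil => simp
  | cons a as ih =>
      have ha := h a (by simp)
      simp only [List.cons_append, List.dropWhile_cons, ha]
      simpa using ih (fun x hx => h x (by simp [hx]))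

-- B on a pending run 'prev ++ cs' (prev nonempty, all non-delimiters) takes exactly
-- prev extended by the run at the head of cs.
lemma pvBGo_run (D : Char → Bool) (prev cs : List Char) (s : Nat)
    (hprev : ∀ c ∈ prev, D c = false) (hne : prev ≠ []) :
    pvBGo D (prev ++ cs) s =
      (String.mk (prev ++ cs.takeWhile (fun x => !D x)), (s : Int)) ::
        pvBGo D (cs.dropWhile (fun x => !D x))
          (s + prev.length + (cs.takeWhile (fun x => !D x)).length) := by
  match prev with
  | [] => exact absurd rfl hne
  | p :: ps =>
    have hall : ∀ x ∈ ps, (fun x => !D x) x = true := by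
      intro x hx; simp [hprev x (by simp [hx])]
    have hp : D p = false := hprev p List.mem_cons_self
    rw [List.cons_append, pvBGo]
    simp only [hp, Bool.false_eq_true, if_false]
    rw [pvTakeWhile_append_of_all _ ps cs hall, pvDropWhile_append_of_all _ ps cs hall]
    simp
    congr 1
    omega

-- Main invariant: running A's loop with pending word 'prev' (all non-delimiters,
-- started at position s) over the rest 'cs' appends exactly B's scan of prev ++ cs from s.
lemma pvAGo_eq_pvBGo (D : Char → Bool) (cs : List Char) :
    ∀ (prev : List Char) (s : Nat) (res : List (String × Int)),
      (∀ c ∈ prev, D c = false) →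
      pvAGo D cs (s + prev.length) prev res = res ++ pvBGo D (prev ++ cs) s := by
  induction cs with
  | nil =>
      intro prev s res hprev
      rw [pvAGo]
      match prev, hprev with
      | [], _ => simp [pvBGo]
      | p :: ps, hprev =>
          have h := pvBGo_run D (p :: ps) [] s hprev (by simp)
          simp only [List.append_nil, List.takeWhile_nil, List.dropWhile_nil] at h
          simp only [List.append_nil]
          rw [h]
          simp [pvBGo]
  | cons c rest ih =>
      intro prev s res hprev
      rw [pvAGo]
      by_cases hc : D c = true
      · simp only [hc, if_true]
        match prev, hprev with
        | [], _ =>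
            have := ih [] (s + 1) res (by simp)
            simp only [List.length_nil, Nat.add_zero, List.nil_append] at this ⊢
            rw [this]
            rw [pvBGo]; simp [hc]
        | p :: ps, hprev =>
            simp only [show ((p :: ps) = []) = False by simp, if_false]
            have hstep := ih [] (s + (p :: ps).length + 1)
              (res ++ [(String.mk (p :: ps), ((s + (p :: ps).length : Nat) : Int) - (p :: ps).length)]) (by simp)
            simp only [List.length_nil, Nat.add_zero, List.nil_append] at hstep
            rw [hstep]
            have h := pvBGo_run D (p :: ps) (c :: rest) s hprev (by simp)
            have htw : (c :: rest).takeWhile (fun x => !D x) = [] := by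
              simp [hc]
            have hdw : (c :: rest).dropWhile (fun x => !D x) = c :: rest := by
              simp [hc]
            rw [htw, hdw] at h
            simp only [List.append_nil, List.length_nil, Nat.add_zero] at h
            rw [h]
            rw [show pvBGo D (c :: rest) (s + (p :: ps).length) =
                  pvBGo D rest (s + (p :: ps).length + 1) by
                rw [pvBGo]; simp [hc]]
            simp
      · simp only [hc]
        have hprev' : ∀ x ∈ prev ++ [c], D x = false := by
          intro x hx
          rcases List.mem_append.mp hx with h | h
          · exact hprev x h
          · simp at h; subst h; simpa using hc
        have := ih (prev ++ [c]) s res hprev'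
        simp only [List.length_append, List.length_cons, List.length_nil, Nat.zero_add] at this
        rw [show s + prev.length + 1 = s + (prev.length + 1) by ring, this]
        simp

-- ===== VERDICT (by name: the statement is the Claim_ definition above) =====
theorem split_with_positions_spec : Claim_equal_split_with_positions := by
  intro delimiters text _
  unfold Spec_split_with_positions split_with_positions split_with_positions_alt
  have := pvAGo_eq_pvBGo
    (fun c => PySem.Set.contains (PySem.Set.ofList delimiters) (String.mk [c]))
    text.toList [] 0 [] (by simp)
  simpa using this
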